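-- pv_equiv track=rewrite | github.com/bihealth/snappy-pipeline | snappy_pipeline/workflows/abstract/models.py | comment_key_paths_naive
-- ===== SOURCE A (Python) =====
-- def comment_key_paths_naive(
--     yaml_str: str, key_paths: list[list[str]], comment_prefix: str = "#"
-- ) -> str:
--     comment_lines: set[int] = set()
--
--     for key_path in key_paths:
--         same_block = False
--         key_line_indent = 0
--         key = key_path[0]
--         for i, line in enumerate(yaml_str.splitlines()):
--             line_indent = len(line) - len(line.lstrip())
--             key_match = line.lstrip().startswith(key + ":")
--             if key_match:
--                 key_path.pop(0)
--                 if key_path: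
--                     key = key_path[0]
--                     continue
--                 else:
--                     key_line_indent = line_indent
--                     same_block = True
--                     comment_lines.add(i)
--                     continue
--             if same_block:
--                 if line_indent > key_line_indent or len(line) == 0:
--                     comment_lines.add(i)
--                 else:
--                     break
--             else:
--                 if not key_path:
--                     break
--
--     return "\n".join(
--         (comment_prefix + line) if i in comment_lines else line
--         for i, line in enumerate(yaml_str.splitlines())
--     )
-- ===== SOURCE B (Python) =====
-- # Two-phase decomposition: first consume the key path as a subsequence of the
-- # lines (prefix match on the stripped line), then collect the following block
-- # (deeper-indented or empty lines) in one forward run; the lines are split once.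
-- # Like A, it trims the consumed keys off each key_path list in place.
--
-- def comment_key_paths_naive(yaml_str, key_paths, comment_prefix="#"):
--     lines = yaml_str.splitlines()
--     commented = set()
--     for key_path in key_paths:
--         hit, left = _match_path(lines, key_path)
--         key_path[:] = left
--         if hit is not None:
--             end, line, rest = hit
--             indent = len(line) - len(line.lstrip())
--             for k in range(end, end + 1 + _block_len(rest, indent)):
--                 commented.add(k)
--     return "\n".join(
--         (comment_prefix + line) if i in commented else line
--         for i, line in enumerate(lines)
--     )
--
--
-- def _match_path(lines, keys):
--     """Consume keys in order as prefixes of stripped lines; on a full match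
--     return ((index of the final matching line, that line, the lines after it),
--     []), otherwise (None, the keys not consumed)."""
--     j = 0
--     for i, line in enumerate(lines):
--         if j < len(keys) and line.lstrip().startswith(keys[j] + ":"):
--             j += 1
--             if j == len(keys):
--                 return (i, line, lines[i + 1:]), []
--     return None, keys[j:]
--
--
-- def _block_len(lines, indent):
--     """Length of the leading run of lines that are empty or indented deeper."""
--     n = 0
--     for line in lines:
--         if len(line) - len(line.lstrip()) > indent or len(line) == 0:
--             n += 1
--         else:
--             break
--     return n
-- ===== Notes on version B (the rewrite author's own statement) =====
-- stated objective: faster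
-- what changed: Replaces A's single stateful per-path scan (same_block flag, mutable key/indent state, and a fresh yaml_str.splitlines() for every path and again for the render) by two phases over lines split exactly once: consume the key path as a subsequence of the lines, returning the final matching line and its tail, then mark the commented block as one contiguous index range; splitting once is the constant-factor win. Pre_ excludes only the inputs on which A raises IndexError (an empty key_path, or a final key re-matching within its commented block's window).
import Mathlib
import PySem

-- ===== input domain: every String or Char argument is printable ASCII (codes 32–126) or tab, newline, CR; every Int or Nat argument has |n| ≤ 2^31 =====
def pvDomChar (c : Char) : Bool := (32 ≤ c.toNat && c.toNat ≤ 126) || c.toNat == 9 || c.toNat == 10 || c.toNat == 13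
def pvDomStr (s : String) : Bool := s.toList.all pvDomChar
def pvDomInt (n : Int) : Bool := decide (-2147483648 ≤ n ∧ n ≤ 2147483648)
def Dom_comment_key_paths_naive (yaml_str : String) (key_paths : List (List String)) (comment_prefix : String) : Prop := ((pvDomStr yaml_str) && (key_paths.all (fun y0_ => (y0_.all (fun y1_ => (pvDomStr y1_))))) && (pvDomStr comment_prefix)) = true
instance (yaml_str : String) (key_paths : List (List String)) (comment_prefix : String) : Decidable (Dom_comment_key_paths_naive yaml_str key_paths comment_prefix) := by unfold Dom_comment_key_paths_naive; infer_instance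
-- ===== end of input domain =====

-- B rewrites A's single stateful per-path scan as two phases (consume the key path as a
-- subsequence of the once-split lines, then mark the following block as one index range);
-- return-value equivalence only: the Python A pops consumed keys from the inner key_path
-- lists in place (B trims them equivalently, but aliasing effects are not modelled here).

-- ===== PORT A =====

-- len(line) - len(line.lstrip())
def pvIndentA (line : List Char) : Int :=
  (line.length : Int) - ((PySem.Chars.lstrip line).length : Int)

-- the inner `for i, line in enumerate(...)` loop of A, one key_path at a time;
-- state: current `key`, remaining `key_path` kp, `same_block` sb, `key_line_indent` kli,
-- accumulated `comment_lines` cl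
def pvLoopA (lines : List (List Char)) (i : Int) (key : List Char) (kp : List (List Char))
    (sb : Bool) (kli : Int) (cl : PySem.Set Int) : PySem.Set Int :=
  match lines with
  | [] => cl
  | line :: rest =>
    let li := pvIndentA line
    if PySem.Chars.startswith (PySem.Chars.lstrip line) (key ++ [':']) then
      match kp with
      | [] => cl  -- Python: key_path.pop(0) raises IndexError here; Pre_ excludes such inputs
      | _ :: krest =>
        match krest with
        | k2 :: _ => pvLoopA rest (i + 1) k2 krest sb kli cl
        | [] => pvLoopA rest (i + 1) key [] true li (PySem.Set.add cl i)
    else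
      if sb then
        if li > kli || line.length == 0 then
          pvLoopA rest (i + 1) key kp sb kli (PySem.Set.add cl i)
        else cl  -- break
      else
        if kp.isEmpty then cl  -- break (dead branch: kp is never empty here)
        else pvLoopA rest (i + 1) key kp sb kli cl

def comment_key_paths_naive (yaml_str : String) (key_paths : List (List String)) (comment_prefix : String) : String :=
  let cl := key_paths.foldl (fun cl key_path =>
      match key_path.map String.toList with
      | [] => cl  -- Python: `key = key_path[0]` raises IndexError; Pre_ excludes such inputs
      | k :: ks =>
        pvLoopA (PySem.Chars.splitlines yaml_str.toList) 0 k (k :: ks) false 0 cl)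
    PySem.Set.empty
  String.ofList (PySem.Chars.join ['\n']
    ((PySem.List.enumerate (PySem.Chars.splitlines yaml_str.toList)).map
      (fun p => if PySem.Set.contains cl p.1 then comment_prefix.toList ++ p.2 else p.2)))

-- ===== PORT B =====

def pvIndentB (line : List Char) : Int :=
  (line.length : Int) - ((PySem.Chars.lstrip line).length : Int)

-- Source B `_match_path`: walk the lines consuming keys; on a full match return
-- (index of the final matching line, that line, the lines after it), else the unconsumed keys
def pvMatchPathB (lines : List (List Char)) (i : Int) (keys : List (List Char)) :
    Option (Int × List Char × List (List Char)) × List (List Char) :=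
  match lines with
  | [] => (none, keys)
  | line :: rest =>
    match keys with
    | [] => pvMatchPathB rest (i + 1) []
    | k :: ks =>
      if PySem.Chars.startswith (PySem.Chars.lstrip line) (k ++ [':']) then
        match ks with
        | [] => (some (i, line, rest), [])
        | _ :: _ => pvMatchPathB rest (i + 1) ks
      else pvMatchPathB rest (i + 1) (k :: ks)

-- Source B `_block_len`: leading run of lines that are empty or indented deeper
def pvBlockLenB (lines : List (List Char)) (indent : Int) : Nat :=
  match lines with
  | [] => 0
  | line :: rest =>
    if pvIndentB line > indent || line.length == 0 then pvBlockLenB rest indent + 1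
    else 0

def comment_key_paths_naive_alt (yaml_str : String) (key_paths : List (List String)) (comment_prefix : String) : String :=
  let lines := PySem.Chars.splitlines yaml_str.toList
  let cl := key_paths.foldl (fun cl key_path =>
      match pvMatchPathB lines 0 (key_path.map String.toList) with
      | (none, _) => cl
      | (some (e, line, rest), _) =>
          (PySem.List.pyRange e (e + 1 + (pvBlockLenB rest (pvIndentB line) : Int)) 1).foldl
            PySem.Set.add cl) PySem.Set.empty
  String.ofList (PySem.Chars.join ['\n']
    ((PySem.List.enumerate lines).map
      (fun p => if PySem.Set.contains cl p.1 then comment_prefix.toList ++ p.2 else p.2)))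

-- ===== PRECONDITION & SPEC =====

-- the line-match predicate both programs use: line.lstrip().startswith(key + ":")
def pvM (line key : List Char) : Bool :=
  PySem.Chars.startswith (PySem.Chars.lstrip line) (key ++ [':'])

-- index of the line at which the key path completes, consumed greedily as a subsequence of
-- prefix-matching lines; none if the path never completes
def pvHitIdx : List (List Char) → List (List Char) → Option Nat
  | [], _ => none
  | _ :: _, [] => none
  | l :: ls, k :: ks =>
    if pvM l k then
      match ks with
      | [] => some 0
      | _ :: _ => (pvHitIdx ls ks).map (· + 1)
    else (pvHitIdx ls (k :: ks)).map (· + 1)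

-- "this key path makes A raise": after the path completes at line h, some later line j
-- re-matches the final key while every line strictly between is deeper-indented or empty
def pvRaisy (lines : List (List Char)) (keys : List (List Char)) : Bool :=
  match pvHitIdx lines keys with
  | none => false
  | some h =>
    (List.range (lines.drop (h + 1)).length).any (fun j =>
      pvM ((lines.drop (h + 1)).getD j []) (keys.getLastD []) &&
      (List.range j).all (fun m =>
        decide (pvIndentB ((lines.drop (h + 1)).getD m []) > pvIndentB (lines.getD h [])) ||
        ((lines.drop (h + 1)).getD m []).length == 0))

-- Pre_ excludes EXACTLY the inputs on which the Python A raises IndexError: an empty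
-- key_path (key_path[0] on an empty list), or a final key that re-matches a line of its
-- commented block or the block's terminating line (key_path.pop(0) on an empty list).
-- A returns on all other inputs and B matches it there.
def Pre_comment_key_paths_naive (yaml_str : String) (key_paths : List (List String)) (comment_prefix : String) : Prop :=
  ∀ kp ∈ key_paths, kp ≠ [] ∧
    pvRaisy (PySem.Chars.splitlines yaml_str.toList) (kp.map String.toList) = false
instance (yaml_str : String) (key_paths : List (List String)) (comment_prefix : String) : Decidable (Pre_comment_key_paths_naive yaml_str key_paths comment_prefix) := by unfold Pre_comment_key_paths_naive; infer_instance

def pvWitness_comment_key_paths_naive : String × List (List String) × String :=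
  ("tool:\n  cnv:\n    path: x\n  other: 1\nstep: 2", [["tool", "cnv"]], "#")

def Spec_comment_key_paths_naive (yaml_str : String) (key_paths : List (List String)) (comment_prefix : String) (out : String) : Prop := out = comment_key_paths_naive_alt yaml_str key_paths comment_prefix
instance (yaml_str : String) (key_paths : List (List String)) (comment_prefix : String) (out : String) : Decidable (Spec_comment_key_paths_naive yaml_str key_paths comment_prefix out) := by unfold Spec_comment_key_paths_naive; infer_instance

-- ===== CLAIM (what is proved, stated in full; the proofs are below) =====
def Claim_equal_comment_key_paths_naive : Prop := ∀ (yaml_str : String) (key_paths : List (List String)) (comment_prefix : String), Dom_comment_key_paths_naive yaml_str key_paths comment_prefix → Pre_comment_key_paths_naive yaml_str key_paths comment_prefix → Spec_comment_key_paths_naive yaml_str key_paths comment_prefix (comment_key_paths_naive yaml_str key_paths comment_prefix)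

-- ===== LEMMAS AND PROOFS =====

theorem pvIndent_eq (line : List Char) : pvIndentA line = pvIndentB line := rfl

theorem pvBlockLenB_cons (line : List Char) (rest : List (List Char)) (kli : Int) :
    pvBlockLenB (line :: rest) kli =
      if pvIndentB line > kli || line.length == 0 then pvBlockLenB rest kli + 1 else 0 := rfl

-- Bool form of "the final key does not re-match within the window A's same_block scan visits"
def pvWinOKb (r : Option (Int × List Char × List (List Char)) × List (List Char))
    (lastkey : List Char) : Bool :=
  match r with
  | (none, _) => true
  | (some (_, line, rest), _) =>
    (rest.take (pvBlockLenB rest (pvIndentB line) + 1)).all (fun l => !pvM l lastkey)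

-- A's same_block phase = B's block length, provided the key does not re-match within the
-- block or on its terminating line (exactly the window A's scan visits)
theorem pvLoopA_sb (rest : List (List Char)) : ∀ (i : Int) (key : List Char) (kli : Int)
    (cl : PySem.Set Int),
    (rest.take (pvBlockLenB rest kli + 1)).all (fun l => !pvM l key) = true →
    pvLoopA rest i key [] true kli cl =
      (PySem.List.pyRange i (i + (pvBlockLenB rest kli : Int)) 1).foldl PySem.Set.add cl := by
  induction rest with
  | nil =>
    intro i key kli cl _
    simp [pvLoopA, pvBlockLenB, PySem.List.pyRange_one_eq_nil]
  | cons line rest ih =>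
    intro i key kli cl h
    have hm : pvM line key = false := by
      have : line ∈ (line :: rest).take (pvBlockLenB (line :: rest) kli + 1) := by
        simp [List.take_succ_cons]
      simpa using List.all_eq_true.mp h line this
    unfold pvLoopA
    rw [show (PySem.Chars.startswith (PySem.Chars.lstrip line) (key ++ [':'])) = false from hm]
    simp only [Bool.false_eq_true, if_false]
    by_cases hc : (decide (pvIndentA line > kli) || line.length == 0) = true
    · have hbl : pvBlockLenB (line :: rest) kli = pvBlockLenB rest kli + 1 := by
        rw [pvBlockLenB_cons, if_pos (show (decide (pvIndentB line > kli) || line.length == 0) = true from hc)]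
      have h' : (rest.take (pvBlockLenB rest kli + 1)).all (fun l => !pvM l key) = true := by
        rw [hbl, List.take_succ_cons, List.all_cons] at h
        exact (Bool.and_eq_true _ _ |>.mp h).2
      rw [if_pos hc, hbl, Nat.cast_add, Nat.cast_one,
        show i + ((pvBlockLenB rest kli : Int) + 1) = (i + 1) + (pvBlockLenB rest kli : Int) by
          ring]
      rw [ih (i + 1) key kli (PySem.Set.add cl i) h']
      conv_rhs => rw [PySem.List.pyRange_one_cons (by omega)]
      simp only [List.foldl_cons, if_true]
    · have hbl : pvBlockLenB (line :: rest) kli = 0 := by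
        rw [pvBlockLenB_cons, if_neg (show ¬ (decide (pvIndentB line > kli) || line.length == 0) = true from hc)]
      rw [if_neg hc, hbl]
      simp [PySem.List.pyRange_one_eq_nil]

-- A's search phase agrees with B's _match_path followed by the block range, provided the
-- final key does not re-match within the commented block's window
theorem pvLoopA_search (lines : List (List Char)) : ∀ (i : Int) (k : List Char)
    (ks : List (List Char)) (kli : Int) (cl : PySem.Set Int),
    pvWinOKb (pvMatchPathB lines i (k :: ks)) (ks.getLastD k) = true →
    pvLoopA lines i k (k :: ks) false kli cl =
      (match pvMatchPathB lines i (k :: ks) with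
       | (none, _) => cl
       | (some (e, line, rest), _) =>
          (PySem.List.pyRange e (e + 1 + (pvBlockLenB rest (pvIndentB line) : Int)) 1).foldl
            PySem.Set.add cl) := by
  induction lines with
  | nil => intro i k ks kli cl _; simp [pvLoopA, pvMatchPathB]
  | cons line rest ih =>
    intro i k ks kli cl hok
    by_cases hm : PySem.Chars.startswith (PySem.Chars.lstrip line) (k ++ [':']) = true
    · cases ks with
      | nil =>
        have hmb : pvMatchPathB (line :: rest) i [k] = (some (i, line, rest), []) := by
          simp only [pvMatchPathB, hm, reduceIte]
        rw [hmb] at hok ⊢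
        simp only [pvWinOKb] at hok
        unfold pvLoopA
        simp only [hm, reduceIte]
        rw [pvLoopA_sb rest (i + 1) k (pvIndentA line) (PySem.Set.add cl i)
          (by rw [pvIndent_eq]; exact hok)]
        show _ = List.foldl PySem.Set.add cl
          (PySem.List.pyRange i (i + 1 + (pvBlockLenB rest (pvIndentB line) : Int)) 1)
        conv_rhs => rw [PySem.List.pyRange_one_cons (by omega)]
        simp only [List.foldl_cons, pvIndent_eq]
      | cons k2 ks' =>
        have hmb : pvMatchPathB (line :: rest) i (k :: k2 :: ks') =
            pvMatchPathB rest (i + 1) (k2 :: ks') := by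
          simp only [pvMatchPathB, hm, reduceIte]
        rw [hmb] at hok ⊢
        rw [List.getLastD_cons] at hok
        unfold pvLoopA
        simp only [hm, reduceIte]
        exact ih (i + 1) k2 ks' kli cl hok
    · have hm' : PySem.Chars.startswith (PySem.Chars.lstrip line) (k ++ [':']) = false :=
        Bool.not_eq_true _ |>.mp hm
      have hmb : pvMatchPathB (line :: rest) i (k :: ks) = pvMatchPathB rest (i + 1) (k :: ks) := by
        simp only [pvMatchPathB, hm', Bool.false_eq_true, reduceIte]
      rw [hmb] at hok ⊢
      unfold pvLoopA
      simp only [hm', Bool.false_eq_true, reduceIte, List.isEmpty_cons]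
      exact ih (i + 1) k ks kli cl hok

-- pvHitIdx locates exactly B's _match_path result
theorem pvHit_match (lines : List (List Char)) : ∀ (keys : List (List Char)) (i : Int),
    keys ≠ [] →
    (match pvHitIdx lines keys with
     | none => (pvMatchPathB lines i keys).1 = none
     | some h => pvMatchPathB lines i keys =
         (some (i + (h : Int), lines.getD h [], lines.drop (h + 1)), [])) := by
  induction lines with
  | nil =>
    intro keys i hne
    obtain ⟨k, ks, rfl⟩ := List.exists_cons_of_ne_nil hne
    simp [pvHitIdx, pvMatchPathB]
  | cons line rest ih =>
    intro keys i hne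
    obtain ⟨k, ks, rfl⟩ := List.exists_cons_of_ne_nil hne
    by_cases hm : pvM line k = true
    · have hm' : PySem.Chars.startswith (PySem.Chars.lstrip line) (k ++ [':']) = true := hm
      cases ks with
      | nil =>
        simp only [pvHitIdx, hm, reduceIte]
        simp [pvMatchPathB, hm']
      | cons k2 ks' =>
        have H := ih (k2 :: ks') (i + 1) (by simp)
        simp only [pvHitIdx, hm, reduceIte]
        cases hh : pvHitIdx rest (k2 :: ks') with
        | none =>
          rw [hh] at H
          simp only [Option.map_none]
          simp only [pvMatchPathB, hm', reduceIte]
          exact H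
        | some h =>
          rw [hh] at H
          simp only [Option.map_some]
          simp only [pvMatchPathB, hm', reduceIte]
          rw [H]
          simp only [List.getD_cons_succ, List.drop_succ_cons, Prod.mk.injEq,
            Option.some.injEq, and_true]
          omega
    · have hm' : PySem.Chars.startswith (PySem.Chars.lstrip line) (k ++ [':']) = false :=
        Bool.not_eq_true _ |>.mp hm
      have H := ih (k :: ks) (i + 1) (by simp)
      simp only [pvHitIdx, hm, Bool.false_eq_true, reduceIte]
      cases hh : pvHitIdx rest (k :: ks) with
      | none =>
        rw [hh] at H
        simp only [Option.map_none]
        simp only [pvMatchPathB, hm', Bool.false_eq_true, reduceIte]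
        exact H
      | some h =>
        rw [hh] at H
        simp only [Option.map_some]
        simp only [pvMatchPathB, hm', Bool.false_eq_true, reduceIte]
        rw [H]
        simp only [List.getD_cons_succ, List.drop_succ_cons, Prod.mk.injEq,
          Option.some.injEq, and_true]
        omega

-- the declarative no-re-match condition of Pre_ implies the window condition of the scan
theorem pvWin_bridge (rest : List (List Char)) : ∀ (ind : Int) (key : List Char),
    (¬ ∃ j < rest.length, pvM (rest.getD j []) key = true ∧
       ∀ m < j, (pvIndentB (rest.getD m []) > ind ∨ (rest.getD m []).length = 0)) →
    (rest.take (pvBlockLenB rest ind + 1)).all (fun l => !pvM l key) = true := by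
  induction rest with
  | nil => intro ind key _; simp
  | cons line rest ih =>
    intro ind key H
    have hm : pvM line key = false := by
      by_cases hc : pvM line key = true
      · exact absurd ⟨0, by simp, by simpa using hc, by omega⟩ H
      · exact Bool.not_eq_true _ |>.mp hc
    by_cases hin : pvIndentB line > ind ∨ line.length = 0
    · have hinb : (decide (pvIndentB line > ind) || line.length == 0) = true := by
        rcases hin with h | h <;> simp [h]
      rw [pvBlockLenB_cons, if_pos hinb, List.take_succ_cons, List.all_cons]
      refine Bool.and_eq_true _ _ |>.mpr ⟨by simp [hm], ?_⟩
      apply ih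
      rintro ⟨j, hj, hmt, hall⟩
      refine H ⟨j + 1, by simpa using Nat.succ_lt_succ hj, by simpa using hmt, ?_⟩
      intro m hmj
      cases m with
      | zero => simpa using hin
      | succ m' => simpa using hall m' (by omega)
    · have hinb : ¬ (decide (pvIndentB line > ind) || line.length == 0) = true := by
        simp only [not_or] at hin
        simp [hin.1, hin.2]
      rw [pvBlockLenB_cons, if_neg hinb]
      simp [hm]

-- Pre_'s per-path condition yields the Bool window hypothesis of pvLoopA_search
theorem pvRaisy_win (lines : List (List Char)) (keys : List (List Char)) (hne : keys ≠ [])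
    (hno : pvRaisy lines keys = false) :
    pvWinOKb (pvMatchPathB lines 0 keys) (keys.getLastD []) = true := by
  have H := pvHit_match lines keys 0 hne
  unfold pvRaisy at hno
  cases hh : pvHitIdx lines keys with
  | none =>
    rw [hh] at H
    rcases hq : pvMatchPathB lines 0 keys with ⟨o, lft⟩
    rw [hq] at H
    cases o with
    | none => simp [pvWinOKb]
    | some v => exact absurd H (by simp)
  | some h =>
    rw [hh] at H hno
    rw [H]
    simp only [pvWinOKb]
    apply pvWin_bridge
    rintro ⟨j, hj, hmt, hall⟩
    rw [← Bool.not_eq_true] at hno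
    apply hno
    refine List.any_eq_true.mpr ⟨j, List.mem_range.mpr hj, ?_⟩
    refine Bool.and_eq_true _ _ |>.mpr ⟨hmt, ?_⟩
    refine List.all_eq_true.mpr ?_
    intro m hm
    rcases hall m (List.mem_range.mp hm) with h | h
    · exact (Bool.or_eq_true _ _).mpr (Or.inl (decide_eq_true h))
    · refine (Bool.or_eq_true _ _).mpr (Or.inr ?_)
      simp only [beq_iff_eq]
      simpa using List.length_eq_zero_iff.mp h

-- the accumulated comment sets of the two programs agree path by path
theorem pvFold (lines : List (List Char)) (kps : List (List String)) :
    ∀ cl : PySem.Set Int,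
    (∀ kp ∈ kps, kp ≠ [] ∧ pvRaisy lines (kp.map String.toList) = false) →
    kps.foldl (fun cl key_path =>
        match key_path.map String.toList with
        | [] => cl
        | k :: ks => pvLoopA lines 0 k (k :: ks) false 0 cl) cl
      = kps.foldl (fun cl key_path =>
        match pvMatchPathB lines 0 (key_path.map String.toList) with
        | (none, _) => cl
        | (some (e, line, rest), _) =>
            (PySem.List.pyRange e (e + 1 + (pvBlockLenB rest (pvIndentB line) : Int)) 1).foldl
              PySem.Set.add cl) cl := by
  induction kps with
  | nil => intro cl _; rfl
  | cons kp kps ih =>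
    intro cl h
    obtain ⟨hne, hno⟩ := h kp (List.mem_cons_self ..)
    obtain ⟨s, ss, rfl⟩ := List.exists_cons_of_ne_nil hne
    simp only [List.foldl_cons, List.map_cons]
    have hwin := pvRaisy_win lines ((s :: ss).map String.toList) (by simp) hno
    rw [List.map_cons, List.getLastD_cons] at hwin
    rw [pvLoopA_search lines 0 s.toList (ss.map String.toList) 0 cl hwin]
    exact ih _ (fun kp hkp => h kp (List.mem_cons_of_mem _ hkp))

-- ===== VERDICT (by name: the statement is the Claim_ definition above) =====
theorem comment_key_paths_naive_spec : Claim_equal_comment_key_paths_naive := by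
  intro yaml_str key_paths comment_prefix _dom hpre
  unfold Spec_comment_key_paths_naive comment_key_paths_naive comment_key_paths_naive_alt
  rw [pvFold (PySem.Chars.splitlines yaml_str.toList) key_paths PySem.Set.empty hpre]
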